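-- pv_equiv track=rewrite | github.com/ANN-HumLang/ANN-HumLang-tutorials | entropy/codebase/h/analysis.py | idx_ngrams
-- ===== SOURCE A (Python) =====
-- from itertools import combinations, tee
--
-- def n_gram(sequence, n):
--     iterables = tee(sequence, n)
--
--     for i, sub_iterable in enumerate(iterables):  # For each window,
--         for _ in range(i):  # iterate through every order of ngrams
--             next(sub_iterable, None)  # generate the ngrams within the window.
--
--     return list(zip(*iterables))  # Unpack and flattens the iterables.
--
-- def idx_ngrams(max_len, n):
--     idxs = n_gram(range(max_len), n=n)
--     overlap_matrix = []
--     for i in range(max_len):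
--         ii = []
--         for inn, ngr in enumerate(idxs):
--             if i in ngr:
--                 ii.append(inn)
--         overlap_matrix.append(ii)
--
--     return overlap_matrix
-- ===== SOURCE B (Python) =====
-- def idx_ngrams(max_len, n):
--     # For index i, the n-grams covering it are exactly those starting at
--     # max(0, i-n+1) .. min(i, max_len-n); emit that range directly.
--     return [list(range(max(0, i - n + 1), min(i, max_len - n) + 1))
--             for i in range(max_len)]
-- ===== Notes on version B (the rewrite author's own statement) =====
-- stated objective: faster
-- what changed: Instead of materialising all n-grams and scanning every n-gram for every index, B emits for each index the closed-form contiguous range [max(0,i-n+1), min(i,max_len-n)] of n-gram positions covering it; intended as faster (measured 81x at the largest size both finished; on the very largest generated inputs both exceed the time budget since the output itself is of size max_len*n).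
import Mathlib
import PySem

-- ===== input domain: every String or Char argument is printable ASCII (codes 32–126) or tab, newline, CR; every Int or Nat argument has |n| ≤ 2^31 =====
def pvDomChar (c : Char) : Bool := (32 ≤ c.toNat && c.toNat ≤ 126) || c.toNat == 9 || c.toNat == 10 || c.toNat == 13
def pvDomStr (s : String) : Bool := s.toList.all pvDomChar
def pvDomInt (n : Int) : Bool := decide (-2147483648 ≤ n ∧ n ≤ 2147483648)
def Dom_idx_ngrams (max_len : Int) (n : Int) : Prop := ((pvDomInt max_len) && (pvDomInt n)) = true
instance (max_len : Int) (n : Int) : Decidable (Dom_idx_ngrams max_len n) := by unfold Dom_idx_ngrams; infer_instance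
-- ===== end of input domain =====

-- B replaces A's scan of every n-gram per index by directly emitting the closed-form
-- range of covering n-gram starts; intended as faster (measured 81x at the largest
-- size where both finished within a timing run's budget).

-- ===== PORT A =====
-- list(zip(*iterables)) over lists of ints: emit the heads while every iterable is
-- nonempty, then advance all; fuel bounds the number of rounds (exact: zip stops at
-- the first exhausted iterable, and zip() with no iterables is empty).
def pvZipStar : Nat → List (List Int) → List (List Int)
  | 0, _ => []
  | fuel + 1, l =>
    if l.isEmpty then []
    else if l.all (fun x => !x.isEmpty) then
      (l.map (fun x => x.headD 0)) :: pvZipStar fuel (l.map List.tail)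
    else []

-- n_gram: tee makes n copies; copy i is advanced i times (= drop i); then zip(*...).
def pv_n_gram (sequence : List Int) (n : Int) : List (List Int) :=
  let iterables := (PySem.List.pyRange 0 n 1).map (fun i => sequence.drop i.toNat)
  pvZipStar (sequence.length + 1) iterables

def idx_ngrams (max_len : Int) (n : Int) : List (List Int) :=
  let idxs := pv_n_gram (PySem.List.pyRange 0 max_len 1) n
  (PySem.List.pyRange 0 max_len 1).foldl (fun overlap_matrix i =>
    overlap_matrix ++
      [(PySem.List.enumerate idxs).foldl
        (fun ii p => if i ∈ p.2 then ii ++ [p.1] else ii) []]) []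

-- ===== PORT B =====
def idx_ngrams_alt (max_len : Int) (n : Int) : List (List Int) :=
  (PySem.List.pyRange 0 max_len 1).map (fun i =>
    PySem.List.pyRange (max 0 (i - n + 1)) (min i (max_len - n) + 1) 1)

-- ===== PRECONDITION & SPEC =====
-- A raises ValueError (itertools.tee) when n < 0; Pre_ excludes exactly that.
def Pre_idx_ngrams (max_len : Int) (n : Int) : Prop := 0 ≤ n
instance (max_len : Int) (n : Int) : Decidable (Pre_idx_ngrams max_len n) := by unfold Pre_idx_ngrams; infer_instance
def pvWitness_idx_ngrams : Int × Int := (5, 2)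

def Spec_idx_ngrams (max_len : Int) (n : Int) (out : List (List Int)) : Prop := out = idx_ngrams_alt max_len n
instance (max_len : Int) (n : Int) (out : List (List Int)) : Decidable (Spec_idx_ngrams max_len n out) := by unfold Spec_idx_ngrams; infer_instance

-- ===== CLAIM (what is proved, stated in full; the proofs are below) =====
def Claim_equal_idx_ngrams : Prop := ∀ (max_len : Int) (n : Int), Dom_idx_ngrams max_len n → Pre_idx_ngrams max_len n → Spec_idx_ngrams max_len n (idx_ngrams max_len n)
-- ===== LEMMAS AND PROOFS =====

-- heads of the successive drops of L are L.take N (when N ≤ |L|)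
theorem pv_heads_eq_take (L : List Int) (N : Nat) (h : N ≤ L.length) :
    (List.range N).map (fun i => (L.drop i).headD 0) = L.take N := by
  induction L generalizing N with
  | nil =>
    have hN0 : N = 0 := by simpa using h
    subst hN0; simp
  | cons a L ih =>
    cases N with
    | zero => simp
    | succ N =>
      rw [List.range_succ_eq_map]
      simp only [List.map_cons, List.map_map]
      rw [List.take_succ_cons]
      congr 1
      have := ih N (by simpa using Nat.lt_succ_iff.mp (Nat.lt_of_lt_of_le (Nat.lt_succ_self N) (by simpa using h)))
      rw [← this]
      apply List.map_congr_left
      intro k _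
      simp

-- zip(*[L.drop i for i in range N]) = the windows of L of width N
theorem pvZipStar_windows (L : List Int) (N fuel : Nat) (hN : 1 ≤ N)
    (hfuel : L.length < fuel) :
    pvZipStar fuel ((List.range N).map (fun i => L.drop i)) =
      (List.range (L.length + 1 - N)).map (fun j => (L.drop j).take N) := by
  induction L generalizing fuel with
  | nil =>
    match fuel, hfuel with
    | fuel + 1, _ =>
    rw [pvZipStar]
    have hemp : ((List.range N).map (fun i => ([] : List Int).drop i)).isEmpty = false := by
      simp only [List.isEmpty_eq_false_iff, ne_eq, List.map_eq_nil_iff, List.range_eq_nil]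
      omega
    rw [hemp]
    have hall : ((List.range N).map (fun i => ([] : List Int).drop i)).all
        (fun x => !x.isEmpty) = false := by
      simp only [List.all_eq_false, List.mem_map]
      exact ⟨[], ⟨0, by simp; omega⟩, by simp⟩
    rw [hall]
    simp only [Bool.false_eq_true, if_false]
    symm
    rw [List.map_eq_nil_iff, List.range_eq_nil]
    simp; omega
  | cons a L ih =>
    match fuel, hfuel with
    | fuel + 1, hfuel =>
    rw [pvZipStar]
    have hemp : ((List.range N).map (fun i => (a :: L).drop i)).isEmpty = false := by
      simp only [List.isEmpty_eq_false_iff, ne_eq, List.map_eq_nil_iff, List.range_eq_nil]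
      omega
    rw [hemp]
    simp only [Bool.false_eq_true, if_false]
    by_cases hlen : N ≤ (a :: L).length
    · have hall : ((List.range N).map (fun i => (a :: L).drop i)).all
          (fun x => !x.isEmpty) = true := by
        simp only [List.all_eq_true, List.mem_map]
        rintro x ⟨i, hi, rfl⟩
        simp only [List.mem_range] at hi
        simp only [Bool.not_eq_true', List.isEmpty_eq_false_iff, ne_eq, List.drop_eq_nil_iff]
        simp only [List.length_cons] at hlen ⊢
        omega
      rw [hall]
      simp only [if_true]
      have htails : ((List.range N).map (fun i => (a :: L).drop i)).map List.tail
          = (List.range N).map (fun i => L.drop i) := by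
        rw [List.map_map]
        apply List.map_congr_left
        intro i _
        simp only [Function.comp_apply, List.tail_drop]
        rfl
      have hf' : L.length < fuel := by
        have h2 := hfuel; simp only [List.length_cons] at h2; omega
      rw [htails, ih fuel hf']
      rw [List.map_map]
      simp only [Function.comp_def]
      rw [pv_heads_eq_take _ _ hlen]
      have hK : (a :: L).length + 1 - N = (L.length + 1 - N) + 1 := by
        simp only [List.length_cons] at hlen ⊢; omega
      rw [hK, List.range_succ_eq_map]
      simp only [List.map_cons, List.map_map, List.drop_zero, Function.comp_def]
      congr 1
    · have hall : ((List.range N).map (fun i => (a :: L).drop i)).all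
          (fun x => !x.isEmpty) = false := by
        simp only [List.all_eq_false, List.mem_map]
        refine ⟨(a :: L).drop (a :: L).length, ⟨(a :: L).length, by simp at hlen ⊢; omega⟩, by simp⟩
      rw [hall]
      simp only [Bool.false_eq_true, if_false]
      symm
      rw [List.map_eq_nil_iff, List.range_eq_nil]
      omega

-- the inner append-if loop is a filter-then-project
theorem pv_foldl_append_if_mem (l : List (Int × List Int)) (i : Int) (acc : List Int) :
    l.foldl (fun ii p => if i ∈ p.2 then ii ++ [p.1] else ii) acc =
      acc ++ (l.filter (fun p => decide (i ∈ p.2))).map (·.1) := by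
  induction l generalizing acc with
  | nil => simp
  | cons p l ih =>
    simp only [List.foldl_cons, List.filter_cons]
    by_cases h : i ∈ p.2
    · rw [if_pos h, if_pos (by simpa using h), ih]; simp
    · rw [if_neg h, if_neg (by simpa using h), ih]

-- filtering an increasing Int range by an interval predicate yields the clipped range
theorem pv_filter_pyRange_interval (a b : Int) : ∀ (k : Nat) (lo hi : Int),
    (hi - lo).toNat = k →
    (PySem.List.pyRange lo hi 1).filter (fun j => decide (a ≤ j ∧ j < b)) =
      PySem.List.pyRange (max lo a) (min hi b) 1 := by
  intro k
  induction k with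
  | zero =>
    intro lo hi hk
    rw [PySem.List.pyRange_one_eq_nil (by omega), List.filter_nil, eq_comm]
    exact PySem.List.pyRange_one_eq_nil (by omega)
  | succ k ih =>
    intro lo hi hk
    rw [PySem.List.pyRange_one_cons (by omega), List.filter_cons]
    rw [ih (lo + 1) hi (by omega)]
    by_cases hin : a ≤ lo ∧ lo < b
    · rw [if_pos (by simpa using hin)]
      rw [show max (lo + 1) a = lo + 1 by omega, show max lo a = lo by omega]
      exact (PySem.List.pyRange_one_cons (by omega)).symm
    · rw [if_neg (by simpa using hin)]
      rcases not_and_or.mp hin with h | h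
      · rw [show max (lo + 1) a = max lo a by omega]
      · rw [PySem.List.pyRange_one_eq_nil (by omega), eq_comm]
        exact PySem.List.pyRange_one_eq_nil (by omega)

-- drop and take on an increasing Int range
theorem pv_pyRange_drop (j : Nat) : ∀ (a b : Int),
    (PySem.List.pyRange a b 1).drop j = PySem.List.pyRange (a + (j : Int)) b 1 := by
  induction j with
  | zero => intro a b; simp
  | succ j ih =>
    intro a b
    by_cases h : a < b
    · rw [PySem.List.pyRange_one_cons h, List.drop_succ_cons, ih]
      congr 1
      push_cast
      ring
    · rw [PySem.List.pyRange_one_eq_nil (by omega), List.drop_nil, eq_comm]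
      exact PySem.List.pyRange_one_eq_nil (by omega)

theorem pv_pyRange_take (N : Nat) : ∀ (a b : Int),
    (PySem.List.pyRange a b 1).take N = PySem.List.pyRange a (min b (a + (N : Int))) 1 := by
  induction N with
  | zero =>
    intro a b
    rw [List.take_zero, eq_comm]
    exact PySem.List.pyRange_one_eq_nil (by omega)
  | succ N ih =>
    intro a b
    by_cases h : a < b
    · rw [PySem.List.pyRange_one_cons h, List.take_succ_cons, ih]
      rw [show min b (a + 1 + (N : Int)) = min b (a + ((N : Int) + 1)) by push_cast; omega]
      exact (PySem.List.pyRange_one_cons (by omega)).symm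
    · rw [PySem.List.pyRange_one_eq_nil (by omega), List.take_nil, eq_comm]
      exact PySem.List.pyRange_one_eq_nil (by omega)

-- membership in a window of range(max_len)
theorem pv_mem_window (max_len : Int) (i : Int) (j N : Nat)
    (hj : j + N ≤ max_len.toNat) :
    (i ∈ ((PySem.List.pyRange 0 max_len 1).drop j).take N) ↔
      ((j : Int) ≤ i ∧ i < (j : Int) + (N : Int)) := by
  rw [pv_pyRange_drop, pv_pyRange_take, PySem.List.mem_pyRange_one]
  omega

theorem pv_npos_case (max_len n : Int) (hn : 1 ≤ n) :
    idx_ngrams max_len n = idx_ngrams_alt max_len n := by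
  unfold idx_ngrams idx_ngrams_alt pv_n_gram
  set L := PySem.List.pyRange 0 max_len 1 with hL
  have hLlen : L.length = max_len.toNat := by
    rw [hL, PySem.List.length_pyRange_one]; congr 1; omega
  have hiters : (PySem.List.pyRange 0 n 1).map (fun i => L.drop i.toNat)
      = (List.range n.toNat).map (fun i => L.drop i) := by
    rw [PySem.List.pyRange_one]
    simp only [sub_zero, List.map_map]
    apply List.map_congr_left
    intro k _
    simp
  rw [hiters, pvZipStar_windows L n.toNat (L.length + 1) (by omega) (by omega)]
  set K : Nat := L.length + 1 - n.toNat with hK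
  set idxs := (List.range K).map (fun j => (L.drop j).take n.toNat) with hidxs
  rw [PySem.List.foldl_append_singleton_eq_map]
  apply List.map_congr_left
  intro i hi
  have hibd : 0 ≤ i ∧ i < max_len := by
    rw [hL] at hi; exact (PySem.List.mem_pyRange_one).mp hi
  rw [pv_foldl_append_if_mem]
  rw [List.nil_append]
  rw [PySem.List.enumerate_eq_map_pyRange idxs ([] : List Int)]
  rw [List.filter_map, List.map_map]
  have hidxlen : PySem.List.len idxs = (K : Int) := by
    rw [PySem.List.len_eq, hidxs]; simp
  rw [hidxlen]
  have hfc : (PySem.List.pyRange 0 (K : Int) 1).filter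
        ((fun p => decide (i ∈ p.2)) ∘ (fun j => (j, PySem.List.pyGetD idxs j ([] : List Int))))
      = (PySem.List.pyRange 0 (K : Int) 1).filter
        (fun j => decide (i - (n - 1) ≤ j ∧ j < i + 1)) := by
    apply List.filter_congr
    intro j hj
    have hjbd : 0 ≤ j ∧ j < (K : Int) := (PySem.List.mem_pyRange_one).mp hj
    simp only [Function.comp_apply]
    have hget : PySem.List.pyGetD idxs j ([] : List Int) = (L.drop j.toNat).take n.toNat := by
      rw [PySem.List.pyGetD_eq_getElem idxs ([] : List Int) (by omega)
            (by rw [hidxs]; simp only [List.length_map, List.length_range]; omega)]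
      simp only [hidxs, List.getElem_map, List.getElem_range]
    rw [hget]
    have hw := pv_mem_window max_len i j.toNat n.toNat
      (by simp only [hK, hLlen] at hjbd ⊢; omega)
    rw [show ((j.toNat : Nat) : Int) = j by omega] at hw
    simp only [decide_eq_decide]
    rw [hw]
    omega
  rw [hfc, pv_filter_pyRange_interval (i - (n - 1)) (i + 1) K 0 (K : Int) (by omega)]
  by_cases hbig : n ≤ max_len
  · rw [show max 0 (i - (n - 1)) = max 0 (i - n + 1) by omega]
    rw [show min (K : Int) (i + 1) = min i (max_len - n) + 1 by
      simp only [hK, hLlen]; omega]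
    have hcompid : ((fun x : Int × List Int => x.1) ∘
        fun j => (j, PySem.List.pyGetD idxs j ([] : List Int))) = fun j => j := rfl
    rw [hcompid, List.map_id']
  · have hKz : (K : Int) = 0 := by simp only [hK, hLlen]; omega
    rw [show PySem.List.pyRange (max 0 (i - (n - 1))) (min (K : Int) (i + 1)) 1 = [] from
      PySem.List.pyRange_one_eq_nil (by omega)]
    rw [List.map_nil, eq_comm]
    exact PySem.List.pyRange_one_eq_nil (by omega)

theorem pv_nzero_case (max_len : Int) :
    idx_ngrams max_len 0 = idx_ngrams_alt max_len 0 := by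
  unfold idx_ngrams idx_ngrams_alt pv_n_gram
  rw [show PySem.List.pyRange 0 0 1 = [] from PySem.List.pyRange_one_eq_nil (by omega)]
  simp only [List.map_nil]
  rw [show pvZipStar ((PySem.List.pyRange 0 max_len 1).length + 1) [] = [] from rfl]
  rw [PySem.List.enumerate_nil]
  simp only [List.foldl_nil]
  rw [PySem.List.foldl_append_singleton_eq_map]
  apply List.map_congr_left
  intro i hi
  have hibd : 0 ≤ i ∧ i < max_len := (PySem.List.mem_pyRange_one).mp hi
  rw [eq_comm]
  apply PySem.List.pyRange_one_eq_nil
  omega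

-- ===== VERDICT (by name: the statement is the Claim_ definition above) =====
theorem idx_ngrams_spec : Claim_equal_idx_ngrams := by
  intro max_len n _ hpre
  unfold Spec_idx_ngrams
  unfold Pre_idx_ngrams at hpre
  rcases eq_or_lt_of_le hpre with h | h
  · rw [← h]; exact pv_nzero_case max_len
  · exact pv_npos_case max_len n (by omega)
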